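-- pv_equiv track=rewrite | github.com/marlcplhra/SSCard | compares/lplm/correct_ground_truth.py | find_all_possible_probabilities
-- ===== SOURCE A (Python) =====
-- def find_all_possible_probabilities(like, all_con_prob_list):
--     wildcard_list = ['$', '^']
--     if len(like) == 0:
--         return all_con_prob_list
--     elif len(like) == 1:
--         all_con_prob_list.append(('%' + like[-1] + '%',))
--         return all_con_prob_list
--     else:
--         if like[-1] not in wildcard_list:
--             if like[-2] not in wildcard_list:
--                 all_con_prob_list.append(('%' + like + '%', '%' + like[:-1] + '%'))
--                 return find_all_possible_probabilities(like[:-1], all_con_prob_list)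
--             else:
--                 if len(like) > 2:
--                     if like[-2] == '^':
--                         all_con_prob_list.append(
--                             ('%' + like[:-2] + '^' + like[-1] + '%', '%' + like[:-2] + '%' + like[-1] + '%'))
--                         all_con_prob_list.append(('%' + like[:-2] + '%' + like[-1] + '%', '%' + like[:-2] + '%'))
--
--                         return find_all_possible_probabilities(like[:-2], all_con_prob_list)
--                     elif like[-2] == '$':
--                         all_con_prob_list.append(('%' + like + '%', '%' + like[:-2] + '%' + like[-1] + '%'))
--                         all_con_prob_list.append(('%' + like[:-2] + '%' + like[-1] + '%', '%' + like[:-2] + '%'))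
--
--                         return find_all_possible_probabilities(like[:-2], all_con_prob_list)
--                 else:
--                     all_con_prob_list.append(('^' + like[-1] + '%', '%' + like[-1] + '%'))
--                     all_con_prob_list.append(('%' + like[-1] + '%',))
--
--                     return find_all_possible_probabilities('', all_con_prob_list)
--         else:
--             if len(all_con_prob_list) == 0:
--                 all_con_prob_list.append(('%' + like[:-1] + '^', '%' + like[:-1] + '%'))
--                 return find_all_possible_probabilities(like[:-1], all_con_prob_list)
-- ===== SOURCE B (Python) =====
-- def render(step):
--     # Pure rendering of one peel step into its tuples.
--     k = step[0]
--     if k == 'single':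
--         c = step[1]
--         return [('%' + c + '%',)]
--     if k == 'plain':
--         p = step[1]
--         return [('%' + p + '%', '%' + p[:-1] + '%')]
--     if k == 'caret':
--         h, a = step[1], step[2]
--         return [('%' + h + '^' + a + '%', '%' + h + '%' + a + '%'),
--                 ('%' + h + '%' + a + '%', '%' + h + '%')]
--     if k == 'dollar':
--         h, a = step[1], step[2]
--         return [('%' + h + '$' + a + '%', '%' + h + '%' + a + '%'),
--                 ('%' + h + '%' + a + '%', '%' + h + '%')]
--     if k == 'two':
--         a = step[1]
--         return [('^' + a + '%', '%' + a + '%'), ('%' + a + '%',)]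
--     # k == 'lead'
--     h = step[1]
--     return [('%' + h + '^', '%' + h + '%')]
--
--
-- def schedule(like, i, fresh):
--     # Phase 1: pure computation of the peel schedule (no mutation).
--     # Returns the list of steps, or None where the peel has no result.
--     steps = []
--     while True:
--         if i == 0:
--             return steps
--         if i == 1:
--             steps.append(('single', like[0]))
--             return steps
--         a, b = like[i - 1], like[i - 2]
--         if a in '$^':
--             if not fresh:
--                 return None
--             steps.append(('lead', like[:i - 1]))
--             i -= 1
--         elif b not in '$^':
--             steps.append(('plain', like[:i]))
--             i -= 1
--         elif i > 2:
--             steps.append(('caret' if b == '^' else 'dollar', like[:i - 2], a))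
--             i -= 2
--         else:
--             steps.append(('two', a))
--             return steps
--         fresh = False
--
--
-- def find_all_possible_probabilities(like, all_con_prob_list):
--     # Two-phase design: compute the pure peel schedule first, then render
--     # every step into tuples and extend the list once.
--     steps = schedule(like, len(like), not all_con_prob_list)
--     if steps is None:
--         return None
--     for s in steps:
--         all_con_prob_list.extend(render(s))
--     return all_con_prob_list
-- ===== Notes on version B (the rewrite author's own statement) =====
-- stated objective: alternative
-- what changed: A's recursion that interleaves peeling the string with mutating the list is replaced by a two-phase design: a pure schedule() pass computes the list of peel steps, a pure render() maps each step to its tuples, and the result list is extended once.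
-- outside the precondition, e.g. on find_all_possible_probabilities('a$', [('x',)]): A returns None, B returns None; on find_all_possible_probabilities('a$$b', []): A returns None, B returns None
import Mathlib
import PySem

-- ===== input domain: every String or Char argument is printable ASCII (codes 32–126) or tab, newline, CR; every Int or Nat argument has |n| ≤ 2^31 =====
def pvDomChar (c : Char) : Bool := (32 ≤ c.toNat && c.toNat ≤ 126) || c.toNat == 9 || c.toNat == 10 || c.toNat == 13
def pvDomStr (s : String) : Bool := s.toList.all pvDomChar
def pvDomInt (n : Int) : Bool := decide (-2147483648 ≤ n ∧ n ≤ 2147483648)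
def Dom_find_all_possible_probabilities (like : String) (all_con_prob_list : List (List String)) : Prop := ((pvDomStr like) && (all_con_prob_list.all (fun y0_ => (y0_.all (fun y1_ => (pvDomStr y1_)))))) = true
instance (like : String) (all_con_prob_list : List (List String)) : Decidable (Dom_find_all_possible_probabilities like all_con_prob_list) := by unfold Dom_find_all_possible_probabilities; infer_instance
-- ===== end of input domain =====

-- B replaces A's interleaved recursion-with-mutation by a two-phase design: a
-- pure `schedule` pass computes the peel steps, a pure `render` maps each step
-- to its tuples, and the list is extended once (objective: simpler decomposition).
-- Both A and B mutate all_con_prob_list in place in Python; the equivalence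
-- proved here is about the returned value (which is that same list).

-- ===== PORT A =====
-- membership in wildcard_list = ['$', '^']
def pvW (c : Char) : Bool := c == '$' || c == '^'
-- '%' + s + '%'
def pvPct (s : List Char) : String := String.mk ('%' :: s ++ ['%'])

-- A's recursion, on the character list of `like`
def pvAux (s : List Char) (acc : List (List String)) : List (List String) :=
  if s.length = 0 then acc
  else if s.length = 1 then
    acc ++ [[pvPct [s.getLast?.getD ' ']]]                 -- ('%'+like[-1]+'%',)
  else
    let a := s.getLast?.getD ' '                           -- like[-1]
    let b := s.dropLast.getLast?.getD ' '                  -- like[-2]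
    if pvW a = false then
      if pvW b = false then
        pvAux s.dropLast
          (acc ++ [[pvPct s, pvPct s.dropLast]])
      else
        if 2 < s.length then
          let t := s.dropLast.dropLast                     -- like[:-2]
          if b = '^' then
            pvAux t (acc ++ [[String.mk ('%' :: t ++ ['^', a, '%']), String.mk ('%' :: t ++ ['%', a, '%'])],
                             [String.mk ('%' :: t ++ ['%', a, '%']), pvPct t]])
          else if b = '$' then
            pvAux t (acc ++ [[pvPct s, String.mk ('%' :: t ++ ['%', a, '%'])],
                             [String.mk ('%' :: t ++ ['%', a, '%']), pvPct t]])
          else acc  -- unreachable (b is '$' or '^' here); Python would fall through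
        else
          pvAux [] (acc ++ [[String.mk ['^', a, '%'], pvPct [a]], [pvPct [a]]])
    else
      if acc.length = 0 then
        pvAux s.dropLast
          (acc ++ [[String.mk ('%' :: s.dropLast ++ ['^']), pvPct s.dropLast]])
      else acc  -- Python returns None here; these inputs are outside Pre_
termination_by s.length
decreasing_by
  all_goals simp [List.length_dropLast] <;> omega

def find_all_possible_probabilities (like : String) (all_con_prob_list : List (List String)) : List (List String) :=
  pvAux like.toList all_con_prob_list

-- ===== PORT B =====
-- a peel step of Source B's `schedule`
inductive PvStep where
  | single : Char → PvStep
  | plain : List Char → PvStep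
  | caret : List Char → Char → PvStep
  | dollar : List Char → Char → PvStep
  | two : Char → PvStep
  | lead : List Char → PvStep
deriving DecidableEq, Repr

-- Source B's `render`: one step → its tuples (pure)
def pvRender : PvStep → List (List String)
  | .single c => [[pvPct [c]]]
  | .plain p => [[pvPct p, pvPct p.dropLast]]
  | .caret h a => [[String.mk ('%' :: h ++ ['^', a, '%']), String.mk ('%' :: h ++ ['%', a, '%'])],
                   [String.mk ('%' :: h ++ ['%', a, '%']), pvPct h]]
  | .dollar h a => [[String.mk ('%' :: h ++ ['$', a, '%']), String.mk ('%' :: h ++ ['%', a, '%'])],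
                    [String.mk ('%' :: h ++ ['%', a, '%']), pvPct h]]
  | .two a => [[String.mk ['^', a, '%'], pvPct [a]], [pvPct [a]]]
  | .lead h => [[String.mk ('%' :: h ++ ['^']), pvPct h]]

-- Source B's `schedule`: the pure peel schedule, `none` where Python B returns None
def pvSched (l : List Char) : Nat → Bool → Option (List PvStep)
  | 0, _ => some []
  | 1, _ => some [.single (l[0]?.getD ' ')]
  | (i+2), fresh =>
      if pvW (l[i+1]?.getD ' ') then
        if fresh then
          match pvSched l (i+1) false with
          | some st => some (.lead (l.take (i+1)) :: st)
          | none => none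
        else none
      else if pvW (l[i]?.getD ' ') = false then
        match pvSched l (i+1) false with
        | some st => some (.plain (l.take (i+2)) :: st)
        | none => none
      else if 0 < i then
        match pvSched l i false with
        | some st =>
            some ((if l[i]?.getD ' ' = '^' then PvStep.caret (l.take i) (l[i+1]?.getD ' ')
                   else PvStep.dollar (l.take i) (l[i+1]?.getD ' ')) :: st)
        | none => none
      else some [.two (l[i+1]?.getD ' ')]
termination_by i _ => i

def find_all_possible_probabilities_alt (like : String) (all_con_prob_list : List (List String)) : List (List String) :=
  match pvSched like.toList like.toList.length all_con_prob_list.isEmpty with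
  | some st => all_con_prob_list ++ st.flatMap pvRender
  | none => all_con_prob_list   -- Python B returns None here; outside Pre_

-- ===== PRECONDITION & SPEC =====
-- Pre_ excludes exactly the inputs on which Python A returns None (not a list):
-- a `like` of length ≥ 2 whose last character is a wildcard while the list is
-- non-empty, or containing two adjacent wildcards not starting at position 0.
def Pre_find_all_possible_probabilities (like : String) (all_con_prob_list : List (List String)) : Prop :=
  ¬ (2 ≤ like.toList.length ∧
      ((pvW (like.toList.getLast?.getD ' ') = true ∧ all_con_prob_list ≠ []) ∨
       ((List.range like.toList.length).any
          (fun j => decide (1 ≤ j) && pvW (like.toList[j]?.getD ' ') && pvW (like.toList[j+1]?.getD ' ')) = true)))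
instance (like : String) (all_con_prob_list : List (List String)) : Decidable (Pre_find_all_possible_probabilities like all_con_prob_list) := by unfold Pre_find_all_possible_probabilities; infer_instance

def pvWitness_find_all_possible_probabilities : String × List (List String) := ("ab^c", [["x"]])

def Spec_find_all_possible_probabilities (like : String) (all_con_prob_list : List (List String)) (out : List (List String)) : Prop := out = find_all_possible_probabilities_alt like all_con_prob_list
instance (like : String) (all_con_prob_list : List (List String)) (out : List (List String)) : Decidable (Spec_find_all_possible_probabilities like all_con_prob_list out) := by unfold Spec_find_all_possible_probabilities; infer_instance

-- ===== CLAIM (what is proved, stated in full; the proofs are below) =====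
def Claim_equal_find_all_possible_probabilities : Prop := ∀ (like : String) (all_con_prob_list : List (List String)), Dom_find_all_possible_probabilities like all_con_prob_list → Pre_find_all_possible_probabilities like all_con_prob_list → Spec_find_all_possible_probabilities like all_con_prob_list (find_all_possible_probabilities like all_con_prob_list)

-- ===== LEMMAS AND PROOFS =====

lemma pv_take_getLast (l : List Char) (i : Nat) (h1 : 1 ≤ i) (h2 : i ≤ l.length) :
    (l.take i).getLast? = l[i-1]? := by
  rw [List.getLast?_eq_getElem?, List.length_take, Nat.min_eq_left h2,
    List.getElem?_take_of_lt (by omega)]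

lemma pv_take_dropLast (l : List Char) (i : Nat) (h2 : i ≤ l.length) :
    (l.take i).dropLast = l.take (i-1) := by
  rw [List.dropLast_eq_take, List.take_take, List.length_take]
  congr 1
  omega

lemma pv_isEmpty_app {A : Type} (acc : List A) (x : A) (xs : List A) :
    (acc ++ (x :: xs)).isEmpty = false := by simp

-- the no-adjacent-wildcards / fresh conditions keep the schedule defined
lemma pv_sched_some (l : List Char)
    (H : ∀ j, 1 ≤ j → ¬(pvW (l[j]?.getD ' ') = true ∧ pvW (l[j+1]?.getD ' ') = true)) :
    ∀ i f, (2 ≤ i → pvW (l[i-1]?.getD ' ') = true → f = true) → (pvSched l i f).isSome := by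
  intro i
  induction i using Nat.strong_induction_on with
  | _ i ih =>
    intro f hf
    match i, hf with
    | 0, _ => simp [pvSched]
    | 1, _ => simp [pvSched]
    | (i+2), hf =>
      rw [pvSched]
      by_cases c1 : pvW (l[i+1]?.getD ' ') = true
      · rw [if_pos c1]
        have hf2 : f = true := hf (by omega) c1
        rw [if_pos hf2]
        have h := ih (i+1) (by omega) false (by
          intro h2 hw
          exact absurd ⟨hw, c1⟩ (H i (by omega)))
        obtain ⟨st, hst⟩ := Option.isSome_iff_exists.mp h
        rw [hst]
        simp
      · rw [if_neg c1]
        by_cases c2 : pvW (l[i]?.getD ' ') = false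
        · rw [if_pos c2]
          have h := ih (i+1) (by omega) false (by
            intro h2 hw
            simp only [Nat.add_sub_cancel] at hw
            rw [hw] at c2
            cases c2)
          obtain ⟨st, hst⟩ := Option.isSome_iff_exists.mp h
          rw [hst]
          simp
        · rw [if_neg c2]
          by_cases c3 : 0 < i
          · rw [if_pos c3]
            have h := ih i (by omega) false (by
              intro h2 hw
              have hb : pvW (l[i]?.getD ' ') = true := by simpa using c2
              have hH := H (i-1) (by omega)
              rw [show i - 1 + 1 = i by omega] at hH
              exact absurd ⟨hw, hb⟩ hH)

            obtain ⟨st, hst⟩ := Option.isSome_iff_exists.mp h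
            rw [hst]
            simp
          · rw [if_neg c3]
            simp

-- take (i+2) ends with the two characters at positions i, i+1
lemma pv_take_two (l : List Char) (i : Nat) (h : i + 2 ≤ l.length) :
    l.take (i+2) = l.take i ++ [l[i]?.getD ' ', l[i+1]?.getD ' '] := by
  have h1 : l.take (i+2) = l.take (i+1) ++ [l[i+1]?.getD ' '] := by
    rw [List.take_succ, List.getElem?_eq_getElem (show i+1 < l.length by omega)]
    rfl
  have h2 : l.take (i+1) = l.take i ++ [l[i]?.getD ' '] := by
    rw [List.take_succ, List.getElem?_eq_getElem (show i < l.length by omega)]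
    rfl
  rw [h1, h2, List.append_assoc]
  rfl

-- whenever the schedule exists, A's recursion equals acc ++ rendered schedule
lemma pv_key (l : List Char) : ∀ i, i ≤ l.length → ∀ acc st,
    pvSched l i acc.isEmpty = some st → pvAux (l.take i) acc = acc ++ st.flatMap pvRender := by
  intro i
  induction i using Nat.strong_induction_on with
  | _ i ih =>
    intro hle acc st hst
    match i, hle, hst with
    | 0, _, hst =>
      rw [pvSched] at hst
      cases hst
      simp [pvAux]
    | 1, hle, hst =>
      rw [pvSched] at hst
      cases hst
      have h0 : 0 < l.length := by omega
      rw [pvAux]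
      simp [List.length_take, Nat.min_eq_left hle, pv_take_getLast l 1 (by omega) hle, pvRender]
    | (i+2), hle, hst =>
      rw [pvSched] at hst
      rw [pvAux]
      have hlen : (l.take (i+2)).length = i + 2 := by
        simp [List.length_take]; omega
      have hdl : (l.take (i+2)).dropLast = l.take (i+1) := pv_take_dropLast l (i+2) hle
      have hdl2 : (l.take (i+1)).dropLast = l.take i := pv_take_dropLast l (i+1) (by omega)
      have ha : (l.take (i+2)).getLast?.getD ' ' = l[i+1]?.getD ' ' := by
        rw [pv_take_getLast l (i+2) (by omega) hle]; rfl
      have hb : (l.take (i+1)).getLast?.getD ' ' = l[i]?.getD ' ' := by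
        rw [pv_take_getLast l (i+1) (by omega) (by omega)]; rfl
      simp only [hlen, hdl, ha, hb, hdl2]
      by_cases c3 : pvW (l[i+1]?.getD ' ') = false
      · -- last char not a wildcard
        rw [if_neg (by simp [c3] : ¬ pvW (l[i+1]?.getD ' ') = true)] at hst
        rw [if_neg (by omega : ¬ i + 2 = 0), if_neg (by omega : ¬ i + 2 = 1), if_pos c3]
        by_cases c4 : pvW (l[i]?.getD ' ') = false
        · -- plain branch
          rw [if_pos c4] at hst
          rw [if_pos c4]
          cases hsched : pvSched l (i+1) false with
          | none => rw [hsched] at hst; cases hst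
          | some st' =>
            rw [hsched] at hst
            cases hst
            have h := ih (i+1) (by omega) (by omega)
              (acc ++ [[pvPct (l.take (i+2)), pvPct (l.take (i+1))]]) st' (by rw [pv_isEmpty_app]; exact hsched)
            rw [h]
            simp [pvRender, hdl]
        · rw [if_neg c4] at hst
          rw [if_neg c4]
          have c4' : pvW (l[i]?.getD ' ') = true := by simpa using c4
          by_cases c5 : 0 < i
          · rw [if_pos c5] at hst
            rw [if_pos (by omega : 2 < i + 2)]
            cases hsched : pvSched l i false with
            | none => rw [hsched] at hst; cases hst
            | some st' =>
              rw [hsched] at hst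
              cases hst
              by_cases c6 : l[i]?.getD ' ' = '^'
              · -- caret branch
                rw [if_pos c6]
                have h := ih i (by omega) (by omega)
                  (acc ++ [[String.mk ('%' :: l.take i ++ ['^', l[i+1]?.getD ' ', '%']),
                            String.mk ('%' :: l.take i ++ ['%', l[i+1]?.getD ' ', '%'])],
                           [String.mk ('%' :: l.take i ++ ['%', l[i+1]?.getD ' ', '%']), pvPct (l.take i)]])
                  st' (by rw [pv_isEmpty_app]; exact hsched)
                rw [h]
                simp [c6, pvRender]
              · -- dollar branch
                have c7 : l[i]?.getD ' ' = '$' := by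
                  simp [pvW, c6] at c4'
                  simp [c4']
                rw [if_neg c6, if_pos c7]
                have htk : pvPct (l.take (i+2)) = String.mk ('%' :: l.take i ++ ['$', l[i+1]?.getD ' ', '%']) := by
                  simp [pvPct, pv_take_two l i hle, c7]
                have h := ih i (by omega) (by omega)
                  (acc ++ [[pvPct (l.take (i+2)), String.mk ('%' :: l.take i ++ ['%', l[i+1]?.getD ' ', '%'])],
                           [String.mk ('%' :: l.take i ++ ['%', l[i+1]?.getD ' ', '%']), pvPct (l.take i)]])
                  st' (by rw [pv_isEmpty_app]; exact hsched)
                rw [h]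
                simp [c6, pvRender, htk]
          · -- i = 0: the 'two' branch
            have hi0 : i = 0 := by omega
            subst hi0
            rw [if_neg c5] at hst
            cases hst
            rw [if_neg (by omega : ¬ (2 < 0 + 2))]
            rw [pvAux]
            simp [pvRender]
      · -- last char is a wildcard: only the fresh 'lead' branch can yield a schedule
        have c3' : pvW (l[i+1]?.getD ' ') = true := by simpa using c3
        rw [if_pos c3'] at hst
        rw [if_neg (by omega : ¬ i + 2 = 0), if_neg (by omega : ¬ i + 2 = 1), if_neg c3]
        by_cases cf : acc.isEmpty
        · rw [if_pos cf] at hst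
          cases hsched : pvSched l (i+1) false with
          | none => rw [hsched] at hst; cases hst
          | some st' =>
            rw [hsched] at hst
            cases hst
            have hif : acc.length = 0 := by simpa [List.isEmpty_iff, List.length_eq_zero_iff] using cf
            rw [if_pos hif]
            have hacc : (acc ++ [[String.mk ('%' :: l.take (i+1) ++ ['^']), pvPct (l.take (i+1))]]).isEmpty = false := by
              simp
            have h := ih (i+1) (by omega) (by omega) _ st' (by rw [hacc]; exact hsched)
            rw [h]
            simp [pvRender]
        · simp only [Bool.not_eq_true] at cf
          rw [cf] at hst
          simp at hst

-- Pre_ implies the schedule exists at the top level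
lemma pv_pre_sched (like : String) (acc : List (List String))
    (hpre : Pre_find_all_possible_probabilities like acc) :
    (pvSched like.toList like.toList.length acc.isEmpty).isSome := by
  unfold Pre_find_all_possible_probabilities at hpre
  by_cases h2 : 2 ≤ like.toList.length
  · have hnPQ : ¬ ((pvW (like.toList.getLast?.getD ' ') = true ∧ acc ≠ []) ∨
       ((List.range like.toList.length).any
          (fun j => decide (1 ≤ j) && pvW (like.toList[j]?.getD ' ') && pvW (like.toList[j+1]?.getD ' ')) = true)) :=
      fun h => hpre ⟨h2, h⟩
    have hP : ¬ (pvW (like.toList.getLast?.getD ' ') = true ∧ acc ≠ []) := fun p => hnPQ (Or.inl p)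
    have hQ : ¬ ((List.range like.toList.length).any
          (fun j => decide (1 ≤ j) && pvW (like.toList[j]?.getD ' ') && pvW (like.toList[j+1]?.getD ' ')) = true) :=
      fun q => hnPQ (Or.inr q)
    apply pv_sched_some
    · intro j hj hw
      obtain ⟨hw1, hw2⟩ := hw
      by_cases hjlt : j < like.toList.length
      · exact hQ (List.any_eq_true.mpr ⟨j, List.mem_range.mpr hjlt, by simp [hj, hw1, hw2]⟩)
      · have hnone : like.toList[j]? = none := List.getElem?_eq_none (by omega)
        rw [hnone] at hw1
        simp [pvW] at hw1
    · intro _ hw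
      have hlast : like.toList.getLast?.getD ' ' = like.toList[like.toList.length - 1]?.getD ' ' := by
        rw [List.getLast?_eq_getElem?]
      rw [← hlast] at hw
      by_contra hne
      simp only [Bool.not_eq_true, List.isEmpty_eq_false_iff] at hne
      exact hP ⟨hw, hne⟩
  · cases hl : like.toList with
    | nil => simp [pvSched]
    | cons a t =>
      cases t with
      | nil => simp [pvSched]
      | cons b t2 => exact absurd (by rw [hl]; simp) h2

-- ===== VERDICT (by name: the statement is the Claim_ definition above) =====
theorem find_all_possible_probabilities_spec : Claim_equal_find_all_possible_probabilities := by
  intro like acc _hdom hpre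
  unfold Spec_find_all_possible_probabilities find_all_possible_probabilities find_all_possible_probabilities_alt
  obtain ⟨st, hst⟩ := Option.isSome_iff_exists.mp (pv_pre_sched like acc hpre)
  rw [hst]
  have h := pv_key like.toList like.toList.length (le_refl _) acc st hst
  rwa [List.take_length] at h
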